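-- pv_equiv track=rewrite | github.com/eaudeweb/naaya | obsolete/old/Naaya-2009_12-editor/Products/NaayaCore/EditorTool/utilities.py | parse_css_border_width
-- ===== SOURCE A (Python) =====
-- def strip_unit(val):
--     """ Strip units from a CSS value
--     `value` Some value like: 12px, 13em etc.
--     Return value without CSS units
--     Reference: http://www.w3schools.com/css/css_units.asp
--     """
--     if val and len(val) >= 1 and val[-1:] == '%':
--         return val[0:-1]
--     if val and len(val) >= 2 and \
--             val[-2:] in ('mm', 'in', 'em', 'ex', 'px', 'pt', 'pc'):
--         return val[0:-2]
--     return val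
--
-- def parse_css_border_width(border):
--     """ Parse the CSS 'border' property. border allows all attributes in one.
--     Parameters:
--         `border`
--             Border property such as: black 1px solid
--     Returns width of the border as number
--     Reference: http://www.w3schools.com/css/css_border.asp
--     """
--     ret = ''
--     if border:
--         parts = border.split(' ')
--         predef = ('thin', 'medium', 'thick')
--         nos = [str(x) for x in range(0, 9)]
--         for part in parts:
--             #Detect in which part the size is located
--             if len(part) >= 1 and part[0] in (nos):
--                 return strip_unit(part)
--         for part in parts:
--             if part in predef:
--                 return part
--     return ret
-- ===== SOURCE B (Python) =====
-- def strip_unit(val):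
--     """ Strip units from a CSS value
--     `value` Some value like: 12px, 13em etc.
--     Return value without CSS units
--     Reference: http://www.w3schools.com/css/css_units.asp
--     """
--     if val and len(val) >= 1 and val[-1:] == '%':
--         return val[0:-1]
--     if val and len(val) >= 2 and \
--             val[-2:] in ('mm', 'in', 'em', 'ex', 'px', 'pt', 'pc'):
--         return val[0:-2]
--     return val
--
-- def parse_css_border_width(border):
--     """Single pass over the parts: return the first numeric part at once,
--     remember the first size keyword as a fallback for the end."""
--     if not border:
--         return ''
--     fallback = None
--     for part in border.split(' '):
--         if part and part[0] in '012345678':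
--             return strip_unit(part)
--         if fallback is None and part in ('thin', 'medium', 'thick'):
--             fallback = part
--     return fallback if fallback is not None else ''
-- ===== Notes on version B (the rewrite author's own statement) =====
-- stated objective: alternative
-- what changed: Replaces A's two sequential scans of the split parts (one for a numeric part, then one for a keyword) with a single pass that returns the first numeric part immediately and carries the first size keyword in a fallback variable returned at the end.
import Mathlib
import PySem

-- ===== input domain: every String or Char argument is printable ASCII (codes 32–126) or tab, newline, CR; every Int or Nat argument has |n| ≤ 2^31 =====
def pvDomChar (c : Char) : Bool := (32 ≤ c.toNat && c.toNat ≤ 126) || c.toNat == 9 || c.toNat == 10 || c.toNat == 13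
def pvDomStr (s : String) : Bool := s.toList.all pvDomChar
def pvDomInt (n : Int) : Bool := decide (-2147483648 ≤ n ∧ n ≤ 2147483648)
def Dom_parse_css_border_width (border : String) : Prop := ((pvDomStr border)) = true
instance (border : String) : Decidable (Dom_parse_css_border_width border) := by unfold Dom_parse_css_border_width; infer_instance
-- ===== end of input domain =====

-- B merges A's two scans over the split parts into one pass that returns the first
-- numeric part immediately and remembers the first size keyword as a fallback (objective: alternative).


-- ===== PORT A =====
-- shared helper (identical in Source A and Source B), over code points
def strip_unit (val : List Char) : List Char :=
  if val ≠ [] ∧ 1 ≤ val.length ∧ PySem.Chars.slice val (some (-1)) none = ['%'] then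
    PySem.Chars.slice val (some 0) (some (-1))
  else if val ≠ [] ∧ 2 ≤ val.length ∧
      PySem.Chars.slice val (some (-2)) none ∈
        [['m','m'], ['i','n'], ['e','m'], ['e','x'], ['p','x'], ['p','t'], ['p','c']] then
    PySem.Chars.slice val (some 0) (some (-2))
  else val

-- nos = [str(x) for x in range(0, 9)]
def pyNos : List (List Char) := (PySem.List.pyRange 0 9 1).map PySem.Int.toChars

def predefA : List (List Char) := ["thin".toList, "medium".toList, "thick".toList]

-- len(part) >= 1 and part[0] in (nos)
def partNumA (part : List Char) : Bool :=
  decide (1 ≤ part.length) &&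
    (match PySem.List.pyGet? part 0 with
     | some c => decide ([c] ∈ pyNos)
     | none => false)

def parse_css_border_width (border : String) : String :=
  if border ≠ "" then
    let parts := PySem.Chars.splitOn border.toList [' ']
    match parts.find? partNumA with
    | some part => String.ofList (strip_unit part)
    | none =>
      match parts.find? (fun p => decide (p ∈ predefA)) with
      | some part => String.ofList part
      | none => ""
  else ""

-- ===== PORT B =====
-- part and part[0] in '012345678'
def partNumB (part : List Char) : Bool :=
  match part with
  | [] => false
  | c :: _ => PySem.Chars.isIn [c] "012345678".toList

def predefB : List (List Char) := ["thin".toList, "medium".toList, "thick".toList]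

-- the single pass, carrying the keyword fallback
def goB : List (List Char) → Option (List Char) → List Char
  | [], fb => fb.getD []
  | p :: ps, fb =>
    if partNumB p then strip_unit p
    else goB ps (if fb.isNone && decide (p ∈ predefB) then some p else fb)

def parse_css_border_width_alt (border : String) : String :=
  if border ≠ "" then
    String.ofList (goB (PySem.Chars.splitOn border.toList [' ']) none)
  else ""

-- ===== PRECONDITION & SPEC =====
def Spec_parse_css_border_width (border : String) (out : String) : Prop := out = parse_css_border_width_alt border
instance (border : String) (out : String) : Decidable (Spec_parse_css_border_width border out) := by unfold Spec_parse_css_border_width; infer_instance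

-- ===== CLAIM (what is proved, stated in full; the proofs are below) =====
def Claim_equal_parse_css_border_width : Prop := ∀ (border : String), Dom_parse_css_border_width border → Spec_parse_css_border_width border (parse_css_border_width border)

-- ===== LEMMAS AND PROOFS =====

theorem pyNos_eq : pyNos = [['0'],['1'],['2'],['3'],['4'],['5'],['6'],['7'],['8']] := by decide

-- the two ports' numeric-first-character tests agree
theorem partNum_eq (p : List Char) : partNumA p = partNumB p := by
  cases p with
  | nil => decide
  | cons c t =>
      simp only [partNumA, partNumB, PySem.List.pyGet?, PySem.List.pyIdx?, pyNos_eq]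
      have h1 : ([c] ∈ [['0'],['1'],['2'],['3'],['4'],['5'],['6'],['7'],['8']]) ↔
          c ∈ ['0','1','2','3','4','5','6','7','8'] := by
        simp
      have h2 : (PySem.Chars.isIn [c] ['0','1','2','3','4','5','6','7','8'] = true) ↔
          c ∈ ['0','1','2','3','4','5','6','7','8'] := by
        rw [PySem.Chars.isIn_iff_infix]
        constructor
        · intro h
          have := h.sublist.subset
          simpa using this
        · intro h
          rcases List.append_of_mem h with ⟨s, t', hl⟩
          exact ⟨s, t', by rw [hl]; simp⟩
      by_cases hc : c ∈ ['0','1','2','3','4','5','6','7','8']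
      · simp [h1.mpr hc, h2.mpr hc]
      · have e2 : PySem.Chars.isIn [c] ['0','1','2','3','4','5','6','7','8'] = false :=
          Bool.eq_false_iff.mpr (fun h => hc (h2.mp h))
        simp [h1, hc, e2]

-- what the single pass computes: first numeric wins, else the recorded/first keyword
theorem goB_char (parts : List (List Char)) : ∀ fb : Option (List Char),
    goB parts fb =
      match parts.find? partNumB with
      | some p => strip_unit p
      | none =>
        match fb with
        | some k => k
        | none =>
          match parts.find? (fun p => decide (p ∈ predefB)) with
          | some p => p
          | none => [] := by
  induction parts with
  | nil => intro fb; cases fb <;> rfl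
  | cons p ps ih =>
      intro fb
      by_cases hn : partNumB p
      · simp [goB, hn, List.find?]
      · cases fb with
        | some k => simp [goB, hn, List.find?, ih]
        | none =>
            by_cases hk : p ∈ predefB
            · simp [goB, hn, List.find?, hk, ih]
            · simp [goB, hn, List.find?, hk, ih]

-- ===== VERDICT (by name: the statement is the Claim_ definition above) =====
theorem parse_css_border_width_spec : Claim_equal_parse_css_border_width := by
  intro border _
  unfold Spec_parse_css_border_width parse_css_border_width parse_css_border_width_alt
  by_cases hb : border = ""
  · simp [hb]
  · simp only [hb, ne_eq, not_false_eq_true, if_true]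
    rw [goB_char]
    have hfun : partNumA = partNumB := funext partNum_eq
    rw [hfun]
    have hpre : predefA = predefB := rfl
    rw [hpre]
    cases (PySem.Chars.splitOn border.toList [' ']).find? partNumB with
    | some p => rfl
    | none =>
        cases (PySem.Chars.splitOn border.toList [' ']).find? (fun p => decide (p ∈ predefB)) with
        | some p => rfl
        | none => rfl
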